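-- pv_equiv track=rewrite | github.com/EraYaN/AdvancedComputing | src/Lab 3/Wrapper/ExecuteBenchmarks.py | GetNumberOfRuns
-- ===== SOURCE A (Python) =====
-- def GetNumberOfRuns(iterations, max_n,network_sizes):
--     result = {"runs": 0, "process_runs":0}
--
--     for network_size in network_sizes:
--         for iteration in range(0,iterations):
--             for n in range(0,max_n):
--                 result['process_runs']+=1
--             result['runs']+=1
--
--     return result
-- ===== SOURCE B (Python) =====
-- def GetNumberOfRuns(iterations, max_n, network_sizes):
--     runs = len(network_sizes) * max(iterations, 0)
--     return {"runs": runs, "process_runs": runs * max(max_n, 0)}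
-- ===== Notes on version B (the rewrite author's own statement) =====
-- stated objective: faster
-- what changed: Replaced the triple nested counting loops by a closed-form product: runs = len(network_sizes)*max(iterations,0) and process_runs = runs*max(max_n,0).
import Mathlib
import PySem

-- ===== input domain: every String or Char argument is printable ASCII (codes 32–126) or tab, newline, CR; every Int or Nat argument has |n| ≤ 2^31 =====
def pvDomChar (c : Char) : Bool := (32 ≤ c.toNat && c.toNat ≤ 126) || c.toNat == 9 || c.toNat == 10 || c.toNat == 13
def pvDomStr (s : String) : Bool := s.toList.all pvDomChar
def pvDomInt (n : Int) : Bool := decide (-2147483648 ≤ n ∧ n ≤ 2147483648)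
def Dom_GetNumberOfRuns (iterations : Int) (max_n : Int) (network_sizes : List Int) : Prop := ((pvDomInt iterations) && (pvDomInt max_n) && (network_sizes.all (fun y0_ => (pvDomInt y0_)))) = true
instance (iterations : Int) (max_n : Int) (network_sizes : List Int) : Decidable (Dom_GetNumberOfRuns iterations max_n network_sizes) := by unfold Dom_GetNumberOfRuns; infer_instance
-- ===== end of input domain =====

-- B replaces A's triple nested counting loops by a closed-form product (objective: faster, measured).

-- ===== PORT A =====
-- the dict {"runs": r, "process_runs": p} is carried as the pair (r, p); returned in insertion order
def GetNumberOfRuns (iterations : Int) (max_n : Int) (network_sizes : List Int) : List (String × Int) :=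
  let result : Int × Int := (0, 0)
  let result := network_sizes.foldl (fun result _network_size =>
    (PySem.List.pyRange 0 iterations 1).foldl (fun result _iteration =>
      let result := (PySem.List.pyRange 0 max_n 1).foldl
        (fun result _n => (result.1, result.2 + 1)) result
      (result.1 + 1, result.2)) result) result
  [("runs", result.1), ("process_runs", result.2)]

-- ===== PORT B =====
def GetNumberOfRuns_alt (iterations : Int) (max_n : Int) (network_sizes : List Int) : List (String × Int) :=
  let runs : Int := (network_sizes.length : Int) * max iterations 0
  [("runs", runs), ("process_runs", runs * max max_n 0)]

-- ===== PRECONDITION & SPEC =====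
def Spec_GetNumberOfRuns (iterations : Int) (max_n : Int) (network_sizes : List Int) (out : List (String × Int)) : Prop := out = GetNumberOfRuns_alt iterations max_n network_sizes
instance (iterations : Int) (max_n : Int) (network_sizes : List Int) (out : List (String × Int)) : Decidable (Spec_GetNumberOfRuns iterations max_n network_sizes out) := by unfold Spec_GetNumberOfRuns; infer_instance

-- ===== CLAIM (what is proved, stated in full; the proofs are below) =====
def Claim_equal_GetNumberOfRuns : Prop := ∀ (iterations : Int) (max_n : Int) (network_sizes : List Int), Dom_GetNumberOfRuns iterations max_n network_sizes → Spec_GetNumberOfRuns iterations max_n network_sizes (GetNumberOfRuns iterations max_n network_sizes)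

-- ===== LEMMAS AND PROOFS =====

-- the innermost loop only increments the second component, once per element
theorem pv_foldl_inc_snd (L : List Int) (st : Int × Int) :
    L.foldl (fun s (_ : Int) => (s.1, s.2 + 1)) st = (st.1, st.2 + L.length) := by
  induction L generalizing st with
  | nil => simp
  | cons x xs ih => simp [List.foldl_cons, ih]; ring

-- a loop whose body adds constants p and q to the two components
theorem pv_foldl_add_pair (p q : Int) (L : List Int) (st : Int × Int) :
    L.foldl (fun s (_ : Int) => (s.1 + p, s.2 + q)) st
      = (st.1 + L.length * p, st.2 + L.length * q) := by
  induction L generalizing st with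
  | nil => simp
  | cons x xs ih => simp [List.foldl_cons, ih]; constructor <;> ring

-- ===== VERDICT (by name: the statement is the Claim_ definition above) =====
theorem GetNumberOfRuns_spec : Claim_equal_GetNumberOfRuns := by
  intro iterations max_n network_sizes _
  unfold Spec_GetNumberOfRuns GetNumberOfRuns GetNumberOfRuns_alt
  simp only [pv_foldl_inc_snd, pv_foldl_add_pair, PySem.List.length_pyRange_one]
  simp; ring
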